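-- pv_equiv track=rewrite | github.com/shohag-PUST/ECE-3102-Data-Communication-Lab | First_Program.py | hdb3
-- ===== SOURCE A (Python) =====
-- def hdb3(signal):
--     hdb3_signal = []
--     last_pulse = -1
--     zero_count = 0
--     ones_count = 0
--
--     for bit in signal:
--         if bit == 1:
--             hdb3_signal.append(last_pulse * -1)
--             last_pulse *= -1
--             zero_count = 0
--             ones_count += 1
--         else:
--             zero_count += 1
--             if zero_count == 4:
--                 if ones_count % 2 == 0:  # Even number of 1s since last substitution
--                     hdb3_signal[-3:] = [last_pulse, 0, 0]
--                     hdb3_signal.append(last_pulse)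
--                 else:  # Odd number of 1s since last substitution
--                     hdb3_signal[-3:] = [0, 0, 0]
--                     hdb3_signal.append(last_pulse * -1)
--                 last_pulse *= -1
--                 zero_count = 0
--                 ones_count = 0
--             else:
--                 hdb3_signal.append(0)
--
--     return hdb3_signal
-- ===== SOURCE B (Python) =====
-- def hdb3(sig):
--     out = []
--     last = -1
--     pending = 0
--     ones = 0
--     for bit in sig:
--         if bit == 1:
--             out.extend([0] * pending)
--             pending = 0
--             out.append(-last)
--             last = -last
--             ones += 1
--         else:
--             pending += 1
--             if pending == 4:
--                 if ones % 2 == 0: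
--                     out.extend([last, 0, 0, last])
--                 else:
--                     out.extend([0, 0, 0, -last])
--                 last = -last
--                 pending = 0
--                 ones = 0
--     out.extend([0] * pending)
--     return out
-- ===== Notes on version B (the rewrite author's own statement) =====
-- stated objective: alternative
-- what changed: Replaces A's append-placeholder-zeros-then-backpatch-the-last-3-slots scheme with a forward-only pass keeping a pending_zeros counter that is flushed on a 1, on a 4-zero substitution, and at the end, so no slice backpatching of already-emitted output occurs.
import Mathlib
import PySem

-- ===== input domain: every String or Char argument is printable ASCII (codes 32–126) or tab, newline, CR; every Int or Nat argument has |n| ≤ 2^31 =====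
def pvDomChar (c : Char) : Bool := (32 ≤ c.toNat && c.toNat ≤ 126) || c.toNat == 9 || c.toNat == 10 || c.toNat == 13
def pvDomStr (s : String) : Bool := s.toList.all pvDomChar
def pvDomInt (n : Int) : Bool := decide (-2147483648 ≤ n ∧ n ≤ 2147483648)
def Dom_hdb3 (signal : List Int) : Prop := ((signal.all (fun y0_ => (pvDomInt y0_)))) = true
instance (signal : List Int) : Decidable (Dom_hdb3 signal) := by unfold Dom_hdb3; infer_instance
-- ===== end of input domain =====

-- Port of A and B: B replaces A's backpatch of the last three emitted zeros by a
-- pending-zeros counter flushed forward; equivalence of return values.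
-- ===== PORT A =====
-- one loop iteration: state = (output so far, last_pulse, zero_count, ones_count)
def hdb3Step (st : List Int × Int × Int × Int) (bit : Int) : List Int × Int × Int × Int :=
  let (out, last, zc, oc) := st
  if bit = 1 then
    (out ++ [last * -1], last * -1, 0, oc + 1)
  else
    let zc := zc + 1
    if zc = 4 then
      if oc % 2 = 0 then
        -- hdb3_signal[-3:] = [last, 0, 0]; append last
        (out.take (out.length - 3) ++ [last, 0, 0] ++ [last], last * -1, 0, 0)
      else
        -- hdb3_signal[-3:] = [0, 0, 0]; append -last
        (out.take (out.length - 3) ++ [0, 0, 0] ++ [last * -1], last * -1, 0, 0)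
    else
      (out ++ [0], last, zc, oc)

def hdb3 (signal : List Int) : List Int :=
  (signal.foldl hdb3Step ([], -1, 0, 0)).1

-- ===== PORT B =====
-- one loop iteration: state = (output so far, last, pending, ones)
def hdb3AltStep (st : List Int × Int × Nat × Nat) (bit : Int) : List Int × Int × Nat × Nat :=
  let (out, last, pending, ones) := st
  if bit = 1 then
    (out ++ List.replicate pending 0 ++ [-last], -last, 0, ones + 1)
  else
    let pending := pending + 1
    if pending = 4 then
      (out ++ (if ones % 2 = 0 then [last, 0, 0, last] else [0, 0, 0, -last]), -last, 0, 0)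
    else
      (out, last, pending, ones)

def hdb3_alt (signal : List Int) : List Int :=
  let st := signal.foldl hdb3AltStep ([], -1, 0, 0)
  st.1 ++ List.replicate st.2.2.1 0

-- ===== PRECONDITION & SPEC =====
def Spec_hdb3 (signal : List Int) (out : List Int) : Prop := out = hdb3_alt signal
instance (signal : List Int) (out : List Int) : Decidable (Spec_hdb3 signal out) := by unfold Spec_hdb3; infer_instance

-- ===== CLAIM (what is proved, stated in full; the proofs are below) =====
def Claim_equal_hdb3 : Prop := ∀ (signal : List Int), Dom_hdb3 signal → Spec_hdb3 signal (hdb3 signal)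

-- ===== LEMMAS AND PROOFS =====

-- loop invariant: A's state is B's state with the pending zeros already appended,
-- the counters agree (as Int casts of B's Nat counters), and pending ≤ 3
theorem hdb3_invariant (bits : List Int) :
    ∀ (out : List Int) (last : Int) (p o : Nat), p ≤ 3 →
      bits.foldl hdb3Step (out ++ List.replicate p 0, last, (p : Int), (o : Int)) =
        (let r := bits.foldl hdb3AltStep (out, last, p, o)
         (r.1 ++ List.replicate r.2.2.1 0, r.2.1, (r.2.2.1 : Int), (r.2.2.2 : Int))) ∧
      (bits.foldl hdb3AltStep (out, last, p, o)).2.2.1 ≤ 3 := by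
  induction bits with
  | nil => intro out last p o hp; exact ⟨rfl, hp⟩
  | cons b rest ih =>
    intro out last p o hp
    by_cases hb : b = 1
    · simpa [List.foldl_cons, hdb3Step, hdb3AltStep, hb] using
        ih (out ++ (List.replicate p 0 ++ [-last])) (-last) 0 (o + 1) (by omega)
    · by_cases h4 : p = 3
      · have htake : ∀ (sub : List Int),
            ((out ++ List.replicate 3 (0 : Int)).take
              ((out ++ List.replicate 3 (0 : Int)).length - 3)) ++ sub = out ++ sub := by
          intro sub
          simp
        by_cases ho : (o : Int) % 2 = 0
        · have ho' : o % 2 = 0 := by omega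
          have := ih (out ++ [last, 0, 0, last]) (-last) 0 0 (by omega)
          simpa [List.foldl_cons, hdb3Step, hdb3AltStep, hb, h4, ho, ho', htake,
                 neg_eq_iff_eq_neg, mul_comm] using this
        · have ho' : ¬ (o % 2 = 0) := by omega
          have := ih (out ++ [0, 0, 0, -last]) (-last) 0 0 (by omega)
          simpa [List.foldl_cons, hdb3Step, hdb3AltStep, hb, h4, ho, ho', htake,
                 neg_eq_iff_eq_neg, mul_comm] using this
      · have h4' : ¬ ((p : Int) + 1 = 4) := by omega
        have h4'' : ¬ (p + 1 = 4) := by omega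
        have hrep : out ++ List.replicate p (0 : Int) ++ [0] =
            out ++ List.replicate (p + 1) (0 : Int) := by
          simp [List.replicate_succ']
        have := ih out last (p + 1) o (by omega)
        simpa [List.foldl_cons, hdb3Step, hdb3AltStep, hb, h4', h4'', hrep,
               push_cast] using this

-- ===== VERDICT (by name: the statement is the Claim_ definition above) =====
theorem hdb3_spec : Claim_equal_hdb3 := by
  intro signal _
  unfold Spec_hdb3 hdb3 hdb3_alt
  have h := (hdb3_invariant signal [] (-1) 0 0 (by omega)).1
  simp only [List.replicate, List.append_nil, Nat.cast_zero] at h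
  rw [h]
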